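-- pv_equiv track=rewrite | github.com/daniel-reich/ubiquitous-fiesta | wZzZ9NtugwsnQEQeM_14.py | golf_score
-- ===== SOURCE A (Python) =====
-- def golf_score(course, result):
--   newlist = []
--   for i in range(len(course)):
--     if result[i] == 'eagle':
--       newlist.append(course[i] - 2)
--     elif result[i] == 'birdie':
--       newlist.append(course[i] - 1)
--     elif result[i] == 'bogey':
--       newlist.append(course[i] + 1)
--     elif result[i] == 'double-bogey':
--       newlist.append(course[i] + 2)
--     elif result[i] == 'par':
--       newlist.append(course[i])
--   return sum(newlist)
-- ===== SOURCE B (Python) =====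
-- _TAGS = ('eagle', 'birdie', 'par', 'bogey', 'double-bogey')
--
-- def golf_score(course, result):
--     # tag-major aggregation: for each known result word, collect the pars of the
--     # holes that got that word, then add their sum plus the word's par offset
--     # (its position in _TAGS minus 2) times how many there are.
--     total = 0
--     for off, tag in enumerate(_TAGS):
--         vals = [c for c, r in zip(course, result) if r == tag]
--         total += sum(vals) + (off - 2) * len(vals)
--     return total
-- ===== Notes on version B (the rewrite author's own statement) =====
-- stated objective: alternative
-- what changed: A makes one hole-major pass with an if-elif chain appending per-hole scores to a list; B traverses tag-major instead: for each of the five known result words it gathers the pars of the holes with that word and adds their sum plus offset*count, relying on commutativity of addition to regroup the total by tag.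
import Mathlib
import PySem

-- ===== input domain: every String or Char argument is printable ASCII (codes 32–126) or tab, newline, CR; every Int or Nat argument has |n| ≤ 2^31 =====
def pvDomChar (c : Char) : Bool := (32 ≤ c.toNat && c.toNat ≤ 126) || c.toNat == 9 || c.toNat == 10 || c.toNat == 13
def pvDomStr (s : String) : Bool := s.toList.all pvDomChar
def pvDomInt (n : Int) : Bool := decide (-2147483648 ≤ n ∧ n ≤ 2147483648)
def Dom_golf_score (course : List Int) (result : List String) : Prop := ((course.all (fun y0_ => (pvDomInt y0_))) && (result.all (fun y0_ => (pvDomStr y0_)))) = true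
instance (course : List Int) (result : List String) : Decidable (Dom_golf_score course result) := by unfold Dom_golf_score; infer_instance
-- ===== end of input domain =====

-- B traverses tag-major (per result word: sum of pars + offset*count) instead of A's hole-major pass; return-value equivalence on Pre_.

-- ===== PORT A =====
def golf_score (course : List Int) (result : List String) : Int :=
  let newlist : List Int :=
    (PySem.List.pyRange 0 (course.length : Int) 1).foldl (fun acc i =>
      let r := PySem.List.pyGetD result i ""
      let c := PySem.List.pyGetD course i 0
      if r == "eagle" then acc ++ [c - 2]
      else if r == "birdie" then acc ++ [c - 1]
      else if r == "bogey" then acc ++ [c + 1]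
      else if r == "double-bogey" then acc ++ [c + 2]
      else if r == "par" then acc ++ [c]
      else acc) []
  newlist.sum

-- ===== PORT B =====
-- the constant tuple _TAGS
def pvTags : List String := ["eagle", "birdie", "par", "bogey", "double-bogey"]

def golf_score_alt (course : List Int) (result : List String) : Int :=
  (PySem.List.enumerate pvTags 0).foldl
    (fun total p =>
      let vals := ((course.zip result).filter (fun q => q.2 == p.2)).map Prod.fst
      total + vals.sum + (p.1 - 2) * (vals.length : Int)) 0

-- ===== PRECONDITION & SPEC =====
-- Pre_ excludes result shorter than course, where A raises IndexError.
def Pre_golf_score (course : List Int) (result : List String) : Prop :=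
  course.length ≤ result.length
instance (course : List Int) (result : List String) : Decidable (Pre_golf_score course result) := by unfold Pre_golf_score; infer_instance
def pvWitness_golf_score : List Int × List String := ([4, 3, 5], ["par", "birdie", "bogey"])

def Spec_golf_score (course : List Int) (result : List String) (out : Int) : Prop := out = golf_score_alt course result
instance (course : List Int) (result : List String) (out : Int) : Decidable (Spec_golf_score course result out) := by unfold Spec_golf_score; infer_instance

-- ===== CLAIM (what is proved, stated in full; the proofs are below) =====
def Claim_equal_golf_score : Prop := ∀ (course : List Int) (result : List String), Dom_golf_score course result → Pre_golf_score course result → Spec_golf_score course result (golf_score course result)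
-- ===== LEMMAS AND PROOFS =====

-- first-match par offset of a result word, as an Option
def pvOffset? (r : String) : Option Int :=
  if r == "eagle" then some (-2)
  else if r == "birdie" then some (-1)
  else if r == "par" then some 0
  else if r == "bogey" then some 1
  else if r == "double-bogey" then some 2
  else none

-- one hole's contribution, as the (zero- or one-element) list A appends for it
def pvHoleL (c : Int) (r : String) : List Int :=
  match pvOffset? r with
  | some d => [c + d]
  | none => []

-- the common hole-major middle form both ports are reduced to
def pvRhs (P : List (Int × String)) : Int :=
  (P.map (fun q => (pvHoleL q.1 q.2).sum)).sum

-- B's foldl, generalized over the paired list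
def pvG (P : List (Int × String)) : Int :=
  (PySem.List.enumerate pvTags 0).foldl
    (fun total p =>
      let vals := (P.filter (fun q => q.2 == p.2)).map Prod.fst
      total + vals.sum + (p.1 - 2) * (vals.length : Int)) 0

-- one tag's aggregated contribution
def pvT (off : Int) (tag : String) (P : List (Int × String)) : Int :=
  ((P.filter (fun q => q.2 == tag)).map Prod.fst).sum
    + (off - 2) * (((P.filter (fun q => q.2 == tag)).map Prod.fst).length : Int)

theorem pvG_expand (P : List (Int × String)) :
    pvG P = pvT 0 "eagle" P + pvT 1 "birdie" P + pvT 2 "par" P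
      + pvT 3 "bogey" P + pvT 4 "double-bogey" P := by
  simp only [pvG, pvTags, PySem.List.enumerate_cons, PySem.List.enumerate_nil,
    List.foldl_cons, List.foldl_nil, pvT]
  ring

theorem pvT_cons (off : Int) (tag : String) (c : Int) (r : String) (P : List (Int × String)) :
    pvT off tag ((c, r) :: P) = (if r == tag then c + (off - 2) else 0) + pvT off tag P := by
  simp only [pvT, List.filter_cons]
  by_cases h : r == tag <;> simp [h]; ring

theorem pvG_eq (P : List (Int × String)) : pvG P = pvRhs P := by
  induction P with
  | nil => decide
  | cons q P' ih =>
    obtain ⟨c, r⟩ := q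
    rw [pvG_expand, pvT_cons, pvT_cons, pvT_cons, pvT_cons, pvT_cons]
    have h' : pvT 0 "eagle" P' + pvT 1 "birdie" P' + pvT 2 "par" P'
        + pvT 3 "bogey" P' + pvT 4 "double-bogey" P' = pvRhs P' := by
      rw [← pvG_expand]; exact ih
    have hhole : (if r == "eagle" then c + (0 - 2) else 0)
        + (if r == "birdie" then c + (1 - 2) else 0)
        + (if r == "par" then c + (2 - 2) else 0)
        + (if r == "bogey" then c + (3 - 2) else 0)
        + (if r == "double-bogey" then c + (4 - 2) else 0) = (pvHoleL c r).sum := by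
      simp only [pvHoleL, pvOffset?]
      split_ifs <;> simp_all
    calc ((if r == "eagle" then c + (0 - 2) else 0) + pvT 0 "eagle" P')
          + ((if r == "birdie" then c + (1 - 2) else 0) + pvT 1 "birdie" P')
          + ((if r == "par" then c + (2 - 2) else 0) + pvT 2 "par" P')
          + ((if r == "bogey" then c + (3 - 2) else 0) + pvT 3 "bogey" P')
          + ((if r == "double-bogey" then c + (4 - 2) else 0) + pvT 4 "double-bogey" P')
        = ((if r == "eagle" then c + (0 - 2) else 0)
          + (if r == "birdie" then c + (1 - 2) else 0)
          + (if r == "par" then c + (2 - 2) else 0)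
          + (if r == "bogey" then c + (3 - 2) else 0)
          + (if r == "double-bogey" then c + (4 - 2) else 0))
          + (pvT 0 "eagle" P' + pvT 1 "birdie" P' + pvT 2 "par" P'
            + pvT 3 "bogey" P' + pvT 4 "double-bogey" P') := by ring
      _ = (pvHoleL c r).sum + pvRhs P' := by rw [hhole, h']
      _ = pvRhs ((c, r) :: P') := by simp [pvRhs]

-- A's loop body is an append of pvHoleL
theorem pvStep_eq (course : List Int) (result : List String) :
    (fun (acc : List Int) (i : Int) =>
      let r := PySem.List.pyGetD result i ""
      let c := PySem.List.pyGetD course i 0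
      if r == "eagle" then acc ++ [c - 2]
      else if r == "birdie" then acc ++ [c - 1]
      else if r == "bogey" then acc ++ [c + 1]
      else if r == "double-bogey" then acc ++ [c + 2]
      else if r == "par" then acc ++ [c]
      else acc)
    = (fun acc i => acc ++ pvHoleL (PySem.List.pyGetD course i 0) (PySem.List.pyGetD result i "")) := by
  funext acc i
  simp only [pvHoleL, pvOffset?]
  split_ifs <;> simp_all <;> ring_nf

theorem pvZip_append_singleton {α β : Type} (xs : List α) (x : α) (rs : List β)
    (h : xs.length < rs.length) :
    (xs ++ [x]).zip rs = xs.zip rs ++ [(x, rs[xs.length]'h)] := by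
  induction xs generalizing rs with
  | nil =>
    cases rs with
    | nil => simp at h
    | cons r rs' => simp
  | cons y ys ih =>
    cases rs with
    | nil => simp at h
    | cons r rs' =>
      simp only [List.cons_append, List.zip_cons_cons]
      rw [ih rs' (by simpa using h)]
      simp

theorem pvMain (course : List Int) (result : List String)
    (h : course.length ≤ result.length) :
    ((PySem.List.pyRange 0 (course.length : Int) 1).flatMap
        (fun i => pvHoleL (PySem.List.pyGetD course i 0) (PySem.List.pyGetD result i ""))).sum
      = pvRhs (course.zip result) := by
  induction course using List.reverseRecOn with
  | nil =>
    simp [pvRhs, PySem.List.pyRange_one_eq_nil]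
  | append_singleton xs x ih =>
    have hlt : xs.length < result.length := by simp at h; omega
    have hsplit : PySem.List.pyRange 0 (((xs ++ [x]).length : Nat) : Int) 1
        = PySem.List.pyRange 0 (xs.length : Int) 1 ++ [(xs.length : Int)] := by
      have : (((xs ++ [x]).length : Nat) : Int) = (xs.length : Int) + 1 := by
        simp
      rw [this, PySem.List.pyRange_one_succ_right (by positivity)]
    rw [hsplit, List.flatMap_append, List.sum_append]
    have hcongr : (PySem.List.pyRange 0 (xs.length : Int) 1).flatMap
        (fun i => pvHoleL (PySem.List.pyGetD (xs ++ [x]) i 0) (PySem.List.pyGetD result i ""))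
        = (PySem.List.pyRange 0 (xs.length : Int) 1).flatMap
        (fun i => pvHoleL (PySem.List.pyGetD xs i 0) (PySem.List.pyGetD result i "")) := by
      apply List.flatMap_congr
      intro i hi
      have hi' := (PySem.List.mem_pyRange_one).1 hi
      have h0 : 0 ≤ i := hi'.1
      have h1 : i < (xs.length : Int) := hi'.2
      rw [PySem.List.pyGetD_eq_getElem (xs ++ [x]) 0 h0 (by simp; omega),
          PySem.List.pyGetD_eq_getElem xs 0 h0 h1]
      congr 1
      exact List.getElem_append_left (by omega)
    rw [hcongr, ih (by omega)]
    have hx : PySem.List.pyGetD (xs ++ [x]) (xs.length : Int) 0 = x := by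
      rw [PySem.List.pyGetD_eq_getElem _ _ (by positivity) (by simp)]
      simp
    have hr : PySem.List.pyGetD result (xs.length : Int) "" = result[xs.length]'hlt := by
      rw [PySem.List.pyGetD_eq_getElem _ _ (by positivity) (by simpa using hlt)]
      simp
    simp only [List.flatMap_cons, List.flatMap_nil, List.append_nil, hx, hr]
    rw [pvRhs, pvRhs, pvZip_append_singleton xs x result hlt]
    simp

-- ===== VERDICT (by name: the statement is the Claim_ definition above) =====
theorem golf_score_spec : Claim_equal_golf_score := by
  intro course result _ hpre
  show golf_score course result = golf_score_alt course result
  rw [golf_score]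
  simp only [pvStep_eq course result]
  rw [PySem.List.foldl_append_eq_flatMap]
  have halt : golf_score_alt course result = pvG (course.zip result) := rfl
  rw [halt, pvG_eq]
  simpa using pvMain course result hpre
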